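-- pv_equiv track=rewrite | github.com/pypi-data/pypi-mirror-306 | packages/sparrow-python/sparrow_python-0.3.3.tar.gz/sparrow_python-0.3.3/sparrow/nlp/text_split.py | _find_split_position
-- ===== SOURCE A (Python) =====
-- def _find_split_position(text: str, pos: int) -> int:
--     """
--     在指定位置附近寻找合适的分割点
--     优先级: 段落 > 句号 > 逗号 > 空格 > 强制分割
--
--     Args:
--         text (str): 文本内容
--         pos (int): 建议的分割位置
--
--     Returns:
--         int: 实际的分割位置
--     """
--     # 向前查找段落分隔符
--     for i in range(pos, max(pos - 200, 0), -1):
--         if text[i] == '\n' and i > 0 and text[i-1] == '\n':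
--             return i
--
--     # 向前查找句号
--     for i in range(pos, max(pos - 100, 0), -1):
--         if text[i] in ['。', '.', '!', '?', '！', '？']:
--             return i + 1
--
--     # 向前查找逗号
--     for i in range(pos, max(pos - 50, 0), -1):
--         if text[i] in ['，', ',', '、']:
--             return i + 1
--
--     # 向前查找空格
--     for i in range(pos, max(pos - 20, 0), -1):
--         if text[i].isspace():
--             return i
--
--     # 如果找不到合适的分割点,则强制分割
--     return pos
-- ===== SOURCE B (Python) =====
-- def _find_split_position(text: str, pos: int) -> int:
--     """Single backward scan over the 200-char window, tracking the closest
--     candidate of each priority class with its own distance limit."""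
--     para = period = comma = space = None
--     for i in range(pos, max(pos - 200, 0), -1):
--         ch = text[i]
--         if para is None and ch == '\n' and i > 0 and text[i - 1] == '\n':
--             para = i
--         if period is None and pos - i < 100 and ch in '。.!?！？':
--             period = i
--         if comma is None and pos - i < 50 and ch in '，,、':
--             comma = i
--         if space is None and pos - i < 20 and ch.isspace():
--             space = i
--     if para is not None:
--         return para
--     if period is not None:
--         return period + 1
--     if comma is not None:
--         return comma + 1
--     if space is not None:
--         return space
--     return pos
-- ===== Notes on version B (the rewrite author's own statement) =====
-- stated objective: alternative
-- what changed: Replaces A's four separate backward scans (200/100/50/20-char windows, one per delimiter class) by a single backward pass over the 200-char window that tracks the closest candidate of each priority class with its own distance limit, then selects by priority.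
import Mathlib
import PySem

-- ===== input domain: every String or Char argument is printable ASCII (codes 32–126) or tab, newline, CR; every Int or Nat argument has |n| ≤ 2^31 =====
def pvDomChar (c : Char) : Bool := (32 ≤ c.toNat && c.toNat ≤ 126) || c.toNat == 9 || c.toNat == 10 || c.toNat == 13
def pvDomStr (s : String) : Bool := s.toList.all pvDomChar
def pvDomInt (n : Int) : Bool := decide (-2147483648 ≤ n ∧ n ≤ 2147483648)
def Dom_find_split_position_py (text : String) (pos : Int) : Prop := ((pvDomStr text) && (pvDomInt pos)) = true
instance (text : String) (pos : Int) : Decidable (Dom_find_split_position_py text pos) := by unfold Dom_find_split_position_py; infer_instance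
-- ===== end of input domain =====

-- B replaces A's four separate backward scans by ONE backward scan over the 200-char
-- window that tracks the closest candidate of each priority class (alternative decomposition).


-- shared helper: text[i] (always in range on inputs inside Pre_; the default is never read there)
def fspGetC (text : String) (i : Int) : Char := (PySem.Str.pyGet? text i).getD '\x00'

-- single-char c.isspace()
def fspIsSpace (c : Char) : Bool := PySem.Chars.isspace c

def fspSentenceEnds : List Char := ['。', '.', '!', '?', '！', '？']
def fspCommas : List Char := ['，', ',', '、']

-- ===== PORT A =====  (four for-loops with early return, each = find? over its countdown range)
def find_split_position_py (text : String) (pos : Int) : Int :=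
  match (PySem.List.pyRange pos (max (pos - 200) 0) (-1)).find?
      (fun i => fspGetC text i == '\n' && decide (0 < i) && (fspGetC text (i - 1) == '\n')) with
  | some i => i
  | none =>
    match (PySem.List.pyRange pos (max (pos - 100) 0) (-1)).find?
        (fun i => fspSentenceEnds.contains (fspGetC text i)) with
    | some i => i + 1
    | none =>
      match (PySem.List.pyRange pos (max (pos - 50) 0) (-1)).find?
          (fun i => fspCommas.contains (fspGetC text i)) with
      | some i => i + 1
      | none =>
        match (PySem.List.pyRange pos (max (pos - 20) 0) (-1)).find?
            (fun i => fspIsSpace (fspGetC text i)) with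
        | some i => i
        | none => pos

-- ===== PORT B =====  (one fold over the 200-window, a 4-option state, then a priority select)
def fspStep (text : String) (pos : Int)
    (s : Option Int × Option Int × Option Int × Option Int) (i : Int) :
    Option Int × Option Int × Option Int × Option Int :=
  let ch := fspGetC text i
  ( if s.1 = none ∧ (ch == '\n' && decide (0 < i) && (fspGetC text (i - 1) == '\n')) = true
      then some i else s.1,
    if s.2.1 = none ∧ pos - i < 100 ∧ fspSentenceEnds.contains ch = true then some i else s.2.1,
    if s.2.2.1 = none ∧ pos - i < 50 ∧ fspCommas.contains ch = true then some i else s.2.2.1,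
    if s.2.2.2 = none ∧ pos - i < 20 ∧ fspIsSpace ch = true then some i else s.2.2.2 )

def find_split_position_py_alt (text : String) (pos : Int) : Int :=
  let st := (PySem.List.pyRange pos (max (pos - 200) 0) (-1)).foldl (fspStep text pos)
    (none, none, none, none)
  match st.1 with
  | some i => i
  | none =>
    match st.2.1 with
    | some i => i + 1
    | none =>
      match st.2.2.1 with
      | some i => i + 1
      | none =>
        match st.2.2.2 with
        | some i => i
        | none => pos

-- ===== PRECONDITION & SPEC =====
-- Pre_ excludes exactly the inputs where Python A raises IndexError: 0 < pos and pos ≥ len(text)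
def Pre_find_split_position_py (text : String) (pos : Int) : Prop :=
  pos ≤ 0 ∨ pos < PySem.Str.len text
instance (text : String) (pos : Int) : Decidable (Pre_find_split_position_py text pos) := by
  unfold Pre_find_split_position_py; infer_instance

def pvWitness_find_split_position_py : String × Int := ("Hello, world. Bye", 14)

def Spec_find_split_position_py (text : String) (pos : Int) (out : Int) : Prop := out = find_split_position_py_alt text pos
instance (text : String) (pos : Int) (out : Int) : Decidable (Spec_find_split_position_py text pos out) := by unfold Spec_find_split_position_py; infer_instance

-- ===== CLAIM (what is proved, stated in full; the proofs are below) =====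
def Claim_equal_find_split_position_py : Prop := ∀ (text : String) (pos : Int), Dom_find_split_position_py text pos → Pre_find_split_position_py text pos → Spec_find_split_position_py text pos (find_split_position_py text pos)


-- ===== LEMMAS AND PROOFS =====

-- boolean predicates for the four priority classes (proof-side names for the ports' tests)
def fspP1 (text : String) (i : Int) : Bool :=
  fspGetC text i == '\n' && decide (0 < i) && (fspGetC text (i - 1) == '\n')
def fspQ2 (text : String) (pos i : Int) : Bool :=
  decide (pos - i < 100) && fspSentenceEnds.contains (fspGetC text i)
def fspQ3 (text : String) (pos i : Int) : Bool :=
  decide (pos - i < 50) && fspCommas.contains (fspGetC text i)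
def fspQ4 (text : String) (pos i : Int) : Bool :=
  decide (pos - i < 20) && fspIsSpace (fspGetC text i)

-- one-component "record the first match" update
def fspUpd (p : Int → Bool) (o : Option Int) (i : Int) : Option Int :=
  if o = none ∧ p i = true then some i else o

theorem fspStep_eq (text : String) (pos : Int)
    (s : Option Int × Option Int × Option Int × Option Int) (i : Int) :
    fspStep text pos s i =
      (fspUpd (fspP1 text) s.1 i, fspUpd (fspQ2 text pos) s.2.1 i,
       fspUpd (fspQ3 text pos) s.2.2.1 i, fspUpd (fspQ4 text pos) s.2.2.2 i) := by
  simp only [fspStep, fspUpd, fspP1, fspQ2, fspQ3, fspQ4,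
    Bool.and_eq_true, decide_eq_true_eq, and_assoc]

theorem fspFoldl_components (text : String) (pos : Int) (l : List Int)
    (s : Option Int × Option Int × Option Int × Option Int) :
    l.foldl (fspStep text pos) s =
      (l.foldl (fspUpd (fspP1 text)) s.1, l.foldl (fspUpd (fspQ2 text pos)) s.2.1,
       l.foldl (fspUpd (fspQ3 text pos)) s.2.2.1, l.foldl (fspUpd (fspQ4 text pos)) s.2.2.2) := by
  induction l generalizing s with
  | nil => rfl
  | cons a l ih => simp only [List.foldl_cons, fspStep_eq, ih]

theorem fspFoldl_upd_or (p : Int → Bool) (l : List Int) (o : Option Int) :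
    l.foldl (fspUpd p) o = o.or (l.find? p) := by
  induction l generalizing o with
  | nil => simp
  | cons a l ih =>
    simp only [List.foldl_cons, List.find?_cons, fspUpd]
    cases o with
    | none =>
      by_cases h : p a = true
      · simp [h, ih]
      · simp [h, ih]
    | some v => simp [ih]

theorem fspFoldl_upd_find? (p : Int → Bool) (l : List Int) :
    l.foldl (fspUpd p) none = l.find? p :=
  fspFoldl_upd_or p l none

theorem fspFind?_congr (l : List Int) (p q : Int → Bool) (h : ∀ x ∈ l, p x = q x) :
    l.find? p = l.find? q := by
  induction l with
  | nil => rfl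
  | cons a l ih =>
    simp only [List.find?_cons, h a (List.mem_cons_self ..)]
    cases hq : q a with
    | true => rfl
    | false => exact ih fun x hx => h x (List.mem_cons_of_mem _ hx)

theorem fspRange_append (a m b : Int) (h1 : b ≤ m) (h2 : m ≤ a) :
    PySem.List.pyRange a b (-1) =
      PySem.List.pyRange a m (-1) ++ PySem.List.pyRange m b (-1) := by
  rw [PySem.List.pyRange_neg_one_eq_reverse, PySem.List.pyRange_neg_one_eq_reverse,
    PySem.List.pyRange_neg_one_eq_reverse, ← List.reverse_append,
    ← PySem.List.pyRange_one_append (b + 1) (m + 1) (a + 1) (by omega) (by omega)]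

-- A's shorter scan window = B's distance test inside the 200-window
theorem fspWindow (pos : Int) (q : Int → Bool) (w1 w2 : Int) (hw : 0 < w2) (hw' : w2 ≤ w1) :
    (PySem.List.pyRange pos (max (pos - w1) 0) (-1)).find?
        (fun i => decide (pos - i < w2) && q i) =
      (PySem.List.pyRange pos (max (pos - w2) 0) (-1)).find? q := by
  by_cases hp : pos ≤ 0
  · rw [PySem.List.pyRange_neg_one_eq_nil (by omega), PySem.List.pyRange_neg_one_eq_nil (by omega)]
    rfl
  · rw [fspRange_append pos (max (pos - w2) 0) (max (pos - w1) 0) (by omega) (by omega),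
      List.find?_append]
    have h1 : (PySem.List.pyRange pos (max (pos - w2) 0) (-1)).find?
        (fun i => decide (pos - i < w2) && q i) =
        (PySem.List.pyRange pos (max (pos - w2) 0) (-1)).find? q := by
      refine fspFind?_congr _ _ _ fun x hx => ?_
      rw [PySem.List.mem_pyRange_neg_one] at hx
      have : pos - x < w2 := by omega
      simp [this]
    have h2 : (PySem.List.pyRange (max (pos - w2) 0) (max (pos - w1) 0) (-1)).find?
        (fun i => decide (pos - i < w2) && q i) = none := by
      rw [List.find?_eq_none]
      intro x hx
      rw [PySem.List.mem_pyRange_neg_one] at hx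
      have : ¬ (pos - x < w2) := by omega
      simp [this]
    rw [h1, h2]
    cases (PySem.List.pyRange pos (max (pos - w2) 0) (-1)).find? q <;> rfl

-- ===== VERDICT (by name: the statement is the Claim_ definition above) =====
theorem find_split_position_py_spec : Claim_equal_find_split_position_py := by
  intro text pos _ _
  unfold Spec_find_split_position_py find_split_position_py find_split_position_py_alt
  rw [fspFoldl_components]
  simp only [fspFoldl_upd_find?]
  rw [show (fun i => fspGetC text i == '\n' && decide (0 < i) && (fspGetC text (i - 1) == '\n'))
        = fspP1 text from rfl]
  rw [← fspWindow pos (fun i => fspSentenceEnds.contains (fspGetC text i)) 200 100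
        (by norm_num) (by norm_num),
      ← fspWindow pos (fun i => fspCommas.contains (fspGetC text i)) 200 50
        (by norm_num) (by norm_num),
      ← fspWindow pos (fun i => fspIsSpace (fspGetC text i)) 200 20
        (by norm_num) (by norm_num)]
  rfl
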